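-- pv_equiv track=rewrite | github.com/hritesh-sonawane/aoc-2024 | day21/day21.py | find_best_x_to_y
-- ===== SOURCE A (Python) =====
-- from collections import deque
--
-- def find_best_x_to_y(keypad, x, y):
--     if x == y:
--         return ["A"]
--
--     q = deque([(x[0], x[1], "")])
--     best_length = float("inf")
--     optimal_paths = []
--
--     while q:
--         r, c, path = q.popleft()
--
--         for nr, nc, move in [(r + 1, c, "v"), (r - 1, c, "^"), (r, c + 1, ">"), (r, c - 1, "<")]:
--             if (nr, nc) not in keypad:
--                 continue
--
--             new_path = path + move
--
--             if (nr, nc) == y: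
--                 optimal_paths.append(new_path + "A")
--                 best_length = min(best_length, len(new_path) + 1)
--             elif len(new_path) < best_length:
--                 q.append((nr, nc, new_path))
--
--     return optimal_paths
-- ===== SOURCE B (Python) =====
-- def find_best_x_to_y(keypad, x, y):
--     # Two-phase: BFS from y computing exact distances-to-y, then a DFS that
--     # enumerates only distance-decreasing moves (priority v,^,>,<), so it
--     # builds exactly the shortest paths, in the same order as a pruned BFS.
--     if x == y:
--         return ["A"]
--     cells = set(keypad)
--     dist = {y: 0}
--     frontier = [y]
--     for k in range(1, len(keypad) + 3):
--         nxt = []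
--         for u in frontier:
--             if u in cells:  # a move may only land on a keypad cell
--                 for v in ((u[0] + 1, u[1]), (u[0] - 1, u[1]), (u[0], u[1] + 1), (u[0], u[1] - 1)):
--                     if v not in dist:
--                         dist[v] = k
--                         nxt.append(v)
--         frontier = nxt
--     d = dist.get(x)
--     if d is None:
--         return []
--
--     def enum(p, k):
--         if k == 0:
--             return ["A"]
--         out = []
--         for v, m in (((p[0] + 1, p[1]), "v"), ((p[0] - 1, p[1]), "^"),
--                      ((p[0], p[1] + 1), ">"), ((p[0], p[1] - 1), "<")):
--             if v in cells and dist.get(v) == k - 1: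
--                 out.extend(m + s for s in enum(v, k - 1))
--         return out
--
--     return enum(x, d)
-- ===== Notes on version B (the rewrite author's own statement) =====
-- stated objective: faster
-- what changed: A's single pruned BFS that enumerates every y-avoiding walk (exponentially many, revisits allowed) is replaced by two phases: a bounded BFS from y that computes exact distances-to-y once, then a DFS that only follows distance-decreasing moves in the fixed priority order v,^,>,<, so it builds exactly the shortest paths in the same order.
-- outside the precondition, e.g. on find_best_x_to_y({(0, 1)}, (0, 0), (5, 5)): A returns [], B returns []
import Mathlib
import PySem

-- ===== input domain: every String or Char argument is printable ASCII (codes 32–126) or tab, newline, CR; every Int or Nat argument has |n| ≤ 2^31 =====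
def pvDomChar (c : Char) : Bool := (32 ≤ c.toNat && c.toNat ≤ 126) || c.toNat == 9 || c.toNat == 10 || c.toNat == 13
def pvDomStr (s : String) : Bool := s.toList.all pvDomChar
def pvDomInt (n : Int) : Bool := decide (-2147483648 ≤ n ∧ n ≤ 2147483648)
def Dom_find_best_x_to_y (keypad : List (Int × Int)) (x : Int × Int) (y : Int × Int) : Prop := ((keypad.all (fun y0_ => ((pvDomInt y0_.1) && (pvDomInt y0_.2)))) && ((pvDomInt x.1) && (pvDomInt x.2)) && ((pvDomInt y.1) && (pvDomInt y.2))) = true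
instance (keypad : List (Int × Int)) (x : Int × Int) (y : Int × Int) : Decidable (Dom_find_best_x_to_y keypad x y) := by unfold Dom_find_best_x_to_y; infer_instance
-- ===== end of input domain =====

-- B replaces A's exponential pruned-BFS walk enumeration by a BFS of distances-to-y followed
-- by a DFS over distance-decreasing moves only (objective: faster; return value only, no mutation).

-- ===== PORT A =====
-- The four neighbour candidates in A's (and B's) fixed priority order v, ^, >, < —
-- the literal tuple list both Pythons write inline.
def pvNbrs (r c : Int) : List ((Int × Int) × Char) :=
  [((r + 1, c), 'v'), ((r - 1, c), '^'), ((r, c + 1), '>'), ((r, c - 1), '<')]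

-- best_length is float('inf') initially, else an int; carried as Option Nat (none = inf),
-- with Python's min against it:
def pvMinO : Option Nat → Nat → Option Nat
  | none, n => some n
  | some m, n => some (min m n)

-- 'len(new_path) < best_length':
def pvLtO : Nat → Option Nat → Bool
  | _, none => true
  | n, some m => decide (n < m)

-- body of A's inner 'for nr, nc, move in [...]' loop; state = (queue, best_length, optimal_paths);
-- paths are carried as List Char and wrapped into String at the very end (PySem convention).
def pvStepA (keypad : List (Int × Int)) (y : Int × Int) (path : List Char)
    (st : List (Int × Int × List Char) × Option Nat × List (List Char))
    (nb : (Int × Int) × Char) :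
    List (Int × Int × List Char) × Option Nat × List (List Char) :=
  if nb.1 ∈ keypad then
    let np := path ++ [nb.2]
    if nb.1 = y then (st.1, pvMinO st.2.1 (np.length + 1), st.2.2 ++ [np ++ ['A']])
    else if pvLtO np.length st.2.1 then (st.1 ++ [(nb.1.1, nb.1.2, np)], st.2.1, st.2.2)
    else st
  else st

-- A's 'while q' loop; the deque is a list popped at the head, appended at the tail.
-- fuel only bounds the number of iterations (under Pre_ the queue empties first; proved below).
def pvLoopA (keypad : List (Int × Int)) (y : Int × Int) :
    Nat → List (Int × Int × List Char) → Option Nat → List (List Char) → List (List Char)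
  | 0, _, _, opt => opt
  | _ + 1, [], _, opt => opt
  | fuel + 1, (r, c, path) :: rest, best, opt =>
    let st := (pvNbrs r c).foldl (pvStepA keypad y path) (rest, best, opt)
    pvLoopA keypad y fuel st.1 st.2.1 st.2.2

def find_best_x_to_y (keypad : List (Int × Int)) (x : Int × Int) (y : Int × Int) : List String :=
  if x = y then ["A"]
  else (pvLoopA keypad y (4 ^ (keypad.length + 2)) [(x.1, x.2, ([] : List Char))] none []).map String.mk

-- ===== PORT B =====
-- the four neighbour positions of p (B's inline tuple of candidate cells):
def pvNbrsPos (p : Int × Int) : List (Int × Int) :=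
  [(p.1 + 1, p.2), (p.1 - 1, p.2), (p.1, p.2 + 1), (p.1, p.2 - 1)]

-- body of B's 'for v in (...)': 'if v not in dist: dist[v] = k; nxt.append(v)'
def pvBfsInner (k : Nat) (st : PySem.Dict (Int × Int) Nat × List (Int × Int)) (v : Int × Int) :
    PySem.Dict (Int × Int) Nat × List (Int × Int) :=
  if st.1.get? v = none then (st.1.insert v k, st.2 ++ [v]) else st

-- body of B's 'for u in frontier':
def pvBfsU (cells : PySem.Set (Int × Int)) (k : Nat)
    (st : PySem.Dict (Int × Int) Nat × List (Int × Int)) (u : Int × Int) :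
    PySem.Dict (Int × Int) Nat × List (Int × Int) :=
  if PySem.Set.contains cells u then (pvNbrsPos u).foldl (pvBfsInner k) st else st

-- B's recursive enum(p, k) (strings as List Char, wrapped at the end):
def pvEnumB (cells : PySem.Set (Int × Int)) (dist : PySem.Dict (Int × Int) Nat) :
    (Int × Int) → Nat → List (List Char)
  | _, 0 => [['A']]
  | p, k + 1 =>
    (pvNbrs p.1 p.2).foldl (fun out vm =>
      if PySem.Set.contains cells vm.1 ∧ dist.get? vm.1 = some k then
        out ++ (pvEnumB cells dist vm.1 k).map (fun s => vm.2 :: s)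
      else out) []

-- B's BFS phase: dist = {y: 0}; frontier = [y]; 'for k in range(1, len(keypad) + 3)'
-- (k ≥ 1 throughout, so k.toNat is exact); 'cells' is set(keypad) = PySem.Set.ofList keypad.
def pvBfsRun (keypad : List (Int × Int)) (y : Int × Int) :
    PySem.Dict (Int × Int) Nat × List (Int × Int) :=
  (PySem.List.pyRange 1 ((keypad.length : Int) + 3) 1).foldl
    (fun st k => st.2.foldl (pvBfsU (PySem.Set.ofList keypad) k.toNat) (st.1, []))
    ((PySem.Dict.empty.insert y 0 : PySem.Dict (Int × Int) Nat), [y])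

def find_best_x_to_y_alt (keypad : List (Int × Int)) (x : Int × Int) (y : Int × Int) : List String :=
  if x = y then ["A"]
  else
    match (pvBfsRun keypad y).1.get? x with
    | none => []
    | some d => (pvEnumB (PySem.Set.ofList keypad) (pvBfsRun keypad y).1 x d).map String.mk

-- ===== PRECONDITION & SPEC =====
-- 'there is a keypad walk p → … → y of length k (every position after p on the keypad)':
def pvReachInB (keypad : List (Int × Int)) : Nat → (Int × Int) → (Int × Int) → Bool
  | 0, p, q => decide (p = q)
  | k + 1, p, q => (pvNbrsPos p).any (fun v => decide (v ∈ keypad) && pvReachInB keypad k v q)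

-- Pre_ excludes the inputs on which A's unpruned walk enumeration never terminates (y not
-- reachable from x while x still has a keypad neighbour to wander to); on the few such inputs
-- where the wandering is a finite dead end A returns [] and B returns [] as well (see claim cites).
def Pre_find_best_x_to_y (keypad : List (Int × Int)) (x : Int × Int) (y : Int × Int) : Prop :=
  x = y ∨ ((List.range (keypad.length + 1)).any (fun k => pvReachInB keypad k x y)) = true ∨
    (∀ v ∈ pvNbrsPos x, v ∉ keypad)
instance (keypad : List (Int × Int)) (x : Int × Int) (y : Int × Int) : Decidable (Pre_find_best_x_to_y keypad x y) := by unfold Pre_find_best_x_to_y; infer_instance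

def pvWitness_find_best_x_to_y : (List (Int × Int)) × (Int × Int) × (Int × Int) :=
  ([(0, 1)], (0, 0), (0, 1))

def Spec_find_best_x_to_y (keypad : List (Int × Int)) (x : Int × Int) (y : Int × Int) (out : List String) : Prop := out = find_best_x_to_y_alt keypad x y
instance (keypad : List (Int × Int)) (x : Int × Int) (y : Int × Int) (out : List String) : Decidable (Spec_find_best_x_to_y keypad x y out) := by unfold Spec_find_best_x_to_y; infer_instance

-- ===== CLAIM (what is proved, stated in full; the proofs are below) =====
def Claim_equal_find_best_x_to_y : Prop := ∀ (keypad : List (Int × Int)) (x : Int × Int) (y : Int × Int), Dom_find_best_x_to_y keypad x y → Pre_find_best_x_to_y keypad x y → Spec_find_best_x_to_y keypad x y (find_best_x_to_y keypad x y)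

-- ===== LEMMAS AND PROOFS =====

theorem pv_witness_ok :
    Dom_find_best_x_to_y pvWitness_find_best_x_to_y.1 pvWitness_find_best_x_to_y.2.1 pvWitness_find_best_x_to_y.2.2 ∧
    Pre_find_best_x_to_y pvWitness_find_best_x_to_y.1 pvWitness_find_best_x_to_y.2.1 pvWitness_find_best_x_to_y.2.2 := by
  constructor <;> decide


-- spec-side notions -------------------------------------------------------

-- entry (p, s) as A's queue triple:
def pvToE (e : (Int × Int) × List Char) : Int × Int × List Char := (e.1.1, e.1.2, e.2)

-- one-step extensions of a walk that stay on the keypad and avoid y (A enqueues exactly these):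
def pvExpand (keypad : List (Int × Int)) (y : Int × Int) (e : (Int × Int) × List Char) :
    List ((Int × Int) × List Char) :=
  (pvNbrs e.1.1 e.1.2).filterMap (fun vm =>
    if vm.1 ∈ keypad ∧ vm.1 ≠ y then some (vm.1, e.2 ++ [vm.2]) else none)

-- all y-avoiding keypad walks of length k from p, in A's BFS (= lexicographic) order:
def pvW (keypad : List (Int × Int)) (y p : Int × Int) : Nat → List ((Int × Int) × List Char)
  | 0 => [(p, [])]
  | k + 1 => (pvW keypad y p k).flatMap (pvExpand keypad y)

-- the finished paths A appends while processing entry e: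
def pvHit (keypad : List (Int × Int)) (y : Int × Int) (e : (Int × Int) × List Char) : List (List Char) :=
  (pvNbrs e.1.1 e.1.2).filterMap (fun vm =>
    if vm.1 ∈ keypad ∧ vm.1 = y then some (e.2 ++ [vm.2] ++ ['A']) else none)

def pvH (keypad : List (Int × Int)) (y p : Int × Int) (k : Nat) : List (List Char) :=
  (pvW keypad y p k).flatMap (pvHit keypad y)

-- all keypad walks of length k from p ending at y, 'A'-terminated, in lexicographic order:
def pvE (keypad : List (Int × Int)) (y : Int × Int) : (Int × Int) → Nat → List (List Char)
  | p, 0 => if p = y then [['A']] else []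
  | p, k + 1 => (pvNbrs p.1 p.2).flatMap (fun vm =>
      if vm.1 ∈ keypad then (pvE keypad y vm.1 k).map (vm.2 :: ·) else [])

-- the children A actually enqueues from entry e under current best b:
def pvChil (keypad : List (Int × Int)) (y : Int × Int) (b : Option Nat)
    (e : (Int × Int) × List Char) : List ((Int × Int) × List Char) :=
  if pvLtO (e.2.length + 1) b then pvExpand keypad y e else []

-- minimal walk length:
def pvMinR (keypad : List (Int × Int)) (y w : Int × Int) (j : Nat) : Prop :=
  pvReachInB keypad j w y = true ∧ ∀ i < j, pvReachInB keypad i w y = false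

-- small algebra ------------------------------------------------------------

theorem pv_ltO_minO (L : Nat) (b : Option Nat) : pvLtO L (pvMinO b (L + 1)) = pvLtO L b := by
  cases b <;> simp [pvLtO, pvMinO]

theorem pv_minO_idem (b : Option Nat) (n : Nat) : pvMinO (pvMinO b n) n = pvMinO b n := by
  cases b <;> simp [pvMinO]

theorem pv_filterMap_eq_flatMap {α β : Type} (l : List α) (f : α → Option β) :
    l.filterMap f = l.flatMap (fun a => (f a).toList) := by
  induction l with
  | nil => rfl
  | cons a t ih => cases h : f a <;> simp [h, ih]

theorem pv_flatMap_congr {α β : Type} {l : List α} {f g : α → List β}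
    (h : ∀ a ∈ l, f a = g a) : l.flatMap f = l.flatMap g := by
  simp only [List.flatMap]
  rw [List.map_congr_left h]

theorem pv_nbrs_fst (p : Int × Int) : (pvNbrs p.1 p.2).map Prod.fst = pvNbrsPos p := rfl

theorem pv_nbrsPos_symm (u v : Int × Int) : v ∈ pvNbrsPos u ↔ u ∈ pvNbrsPos v := by
  simp [pvNbrsPos, Prod.ext_iff]
  constructor <;> rintro (⟨h1, h2⟩ | ⟨h1, h2⟩ | ⟨h1, h2⟩ | ⟨h1, h2⟩) <;> omega

-- reachability facts -------------------------------------------------------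

theorem pv_flatMap_len_le {α β : Type} (l : List α) (f : α → List β)
    (hf : ∀ e ∈ l, (f e).length ≤ 4) : (l.flatMap f).length ≤ 4 * l.length := by
  induction l with
  | nil => simp
  | cons a t ih =>
    simp only [List.flatMap_cons, List.length_append, List.length_cons]
    have h1 := hf a (by simp)
    have h2 := ih (fun e he => hf e (by simp [he]))
    omega

theorem pv_hit_empty_iff (keypad : List (Int × Int)) (y : Int × Int) (e : (Int × Int) × List Char) :
    pvHit keypad y e = [] ↔
      (pvNbrs e.1.1 e.1.2).any (fun vm => decide (vm.1 ∈ keypad) && decide (vm.1 = y)) = false := by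
  rw [pvHit, List.filterMap_eq_nil_iff, List.any_eq_false]
  constructor
  · intro h vm hvm
    have := h vm hvm
    by_cases h1 : vm.1 ∈ keypad ∧ vm.1 = y
    · rw [if_pos h1] at this; cases this
    · simp only [Bool.and_eq_true, decide_eq_true_eq]
      tauto
  · intro h vm hvm
    have := h vm hvm
    simp only [Bool.and_eq_true, decide_eq_true_eq, not_and] at this
    rw [if_neg (by tauto)]

theorem pv_reach_succ (keypad : List (Int × Int)) (v : Int × Int) :
    ∀ (k : Nat) (x p : Int × Int), pvReachInB keypad k x p = true →
      v ∈ pvNbrsPos p → v ∈ keypad → pvReachInB keypad (k + 1) x v = true := by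
  intro k
  induction k with
  | zero =>
    intro x p h hv hkp
    have hx : x = p := by simpa [pvReachInB] using h
    subst hx
    simp only [pvReachInB, List.any_eq_true, Bool.and_eq_true, decide_eq_true_eq]
    exact ⟨v, hv, hkp, by simp⟩
  | succ k ih =>
    intro x p h hv hkp
    rw [pvReachInB] at h ⊢
    rw [List.any_eq_true] at h ⊢
    obtain ⟨w, hw, hwb⟩ := h
    rw [Bool.and_eq_true, decide_eq_true_eq] at hwb
    refine ⟨w, hw, ?_⟩
    rw [Bool.and_eq_true, decide_eq_true_eq]
    exact ⟨hwb.1, ih w p hwb.2 hv hkp⟩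

theorem pv_W_len (keypad : List (Int × Int)) (y p : Int × Int) :
    ∀ (k : Nat) (e : (Int × Int) × List Char), e ∈ pvW keypad y p k → e.2.length = k := by
  intro k
  induction k with
  | zero => intro e he; simp [pvW] at he; simp [he]
  | succ k ih =>
    intro e he
    simp only [pvW, List.mem_flatMap] at he
    obtain ⟨e2, he2, hmem⟩ := he
    simp only [pvExpand, List.mem_filterMap] at hmem
    obtain ⟨vm, _, hif⟩ := hmem
    split at hif
    · cases hif; simp [ih e2 he2]
    · cases hif

theorem pv_W_reach (keypad : List (Int × Int)) (y x : Int × Int) :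
    ∀ (k : Nat) (e : (Int × Int) × List Char), e ∈ pvW keypad y x k →
      pvReachInB keypad k x e.1 = true := by
  intro k
  induction k with
  | zero => intro e he; simp [pvW] at he; simp [he, pvReachInB]
  | succ k ih =>
    intro e he
    simp only [pvW, List.mem_flatMap] at he
    obtain ⟨e2, he2, hmem⟩ := he
    simp only [pvExpand, List.mem_filterMap] at hmem
    obtain ⟨vm, hvm, hif⟩ := hmem
    split at hif
    · rename_i hcond
      cases hif
      have hpos : vm.1 ∈ pvNbrsPos e2.1 := by
        rw [← pv_nbrs_fst]; exact List.mem_map_of_mem hvm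
      exact pv_reach_succ keypad vm.1 k x e2.1 (ih e2 he2) hpos hcond.1
    · cases hif

theorem pv_hit_ne (keypad : List (Int × Int)) (y : Int × Int) (e : (Int × Int) × List Char)
    (h : pvHit keypad y e ≠ []) : y ∈ pvNbrsPos e.1 ∧ y ∈ keypad := by
  obtain ⟨s, hs⟩ := List.exists_mem_of_ne_nil _ h
  simp only [pvHit, List.mem_filterMap] at hs
  obtain ⟨vm, hvm, hif⟩ := hs
  split at hif
  · rename_i hcond
    have hpos : vm.1 ∈ pvNbrsPos e.1 := by
      rw [← pv_nbrs_fst]; exact List.mem_map_of_mem hvm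
    rw [hcond.2] at hpos
    exact ⟨hpos, hcond.2 ▸ hcond.1⟩
  · cases hif

theorem pv_reach_parity (keypad : List (Int × Int)) (y : Int × Int) :
    ∀ (k : Nat) (p : Int × Int), pvReachInB keypad k p y = true →
      ∃ t : Int, p.1 + p.2 + (k : Int) - y.1 - y.2 = 2 * t := by
  intro k
  induction k with
  | zero =>
    intro p h
    have hx : p = y := by simpa [pvReachInB] using h
    subst hx
    exact ⟨0, by push_cast; ring⟩
  | succ k ih =>
    intro p h
    simp only [pvReachInB, List.any_eq_true, Bool.and_eq_true, decide_eq_true_eq] at h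
    obtain ⟨v, hv, _, hr⟩ := h
    obtain ⟨t, ht⟩ := ih v hr
    simp only [pvNbrsPos, List.mem_cons, List.not_mem_nil, or_false] at hv
    rcases hv with hv | hv | hv | hv <;> subst hv <;> simp only at ht <;>
      [exact ⟨t, by push_cast at ht ⊢; omega⟩; exact ⟨t + 1, by push_cast at ht ⊢; omega⟩;
       exact ⟨t, by push_cast at ht ⊢; omega⟩; exact ⟨t + 1, by push_cast at ht ⊢; omega⟩]

theorem pv_E_ne (keypad : List (Int × Int)) (y : Int × Int) :
    ∀ (k : Nat) (p : Int × Int), pvReachInB keypad k p y = true → pvE keypad y p k ≠ [] := by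
  intro k
  induction k with
  | zero =>
    intro p h
    have hx : p = y := by simpa [pvReachInB] using h
    subst hx
    simp [pvE]
  | succ k ih =>
    intro p h
    simp only [pvReachInB, List.any_eq_true, Bool.and_eq_true, decide_eq_true_eq] at h
    obtain ⟨v, hv, hvkp, hr⟩ := h
    have hE := ih v hr
    intro hnil
    rw [pvE, List.flatMap_eq_nil_iff] at hnil
    simp only [pvNbrsPos, List.mem_cons, List.not_mem_nil, or_false] at hv
    rcases hv with hv | hv | hv | hv <;>
      [have hm := hnil ((p.1 + 1, p.2), 'v') (by simp [pvNbrs]);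
       have hm := hnil ((p.1 - 1, p.2), '^') (by simp [pvNbrs]);
       have hm := hnil ((p.1, p.2 + 1), '>') (by simp [pvNbrs]);
       have hm := hnil ((p.1, p.2 - 1), '<') (by simp [pvNbrs])] <;>
    · rw [← hv] at hm
      simp only [hvkp, if_true, List.map_eq_nil_iff] at hm
      exact hE hm

theorem pv_E_nil (keypad : List (Int × Int)) (y : Int × Int) :
    ∀ (k : Nat) (p : Int × Int), pvReachInB keypad k p y = false → pvE keypad y p k = [] := by
  intro k
  induction k with
  | zero =>
    intro p h
    have hx : p ≠ y := by simpa [pvReachInB] using h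
    simp [pvE, hx]
  | succ k ih =>
    intro p h
    rw [pvE, List.flatMap_eq_nil_iff]
    intro vm hvm
    split
    · rename_i hkp
      have hpos : vm.1 ∈ pvNbrsPos p := by
        rw [← pv_nbrs_fst]; exact List.mem_map_of_mem hvm
      have hr : pvReachInB keypad k vm.1 y = false := by
        by_contra hc
        have hc2 : pvReachInB keypad k vm.1 y = true := by
          cases hb : pvReachInB keypad k vm.1 y
          · exact absurd hb hc
          · rfl
        have : pvReachInB keypad (k + 1) p y = true := by
          simp only [pvReachInB, List.any_eq_true, Bool.and_eq_true, decide_eq_true_eq]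
          exact ⟨vm.1, hpos, hkp, hc2⟩
        rw [this] at h; cases h
      rw [ih vm.1 hr, List.map_nil]
    · rfl

-- peeling the root off pvW / pvH ------------------------------------------

theorem pv_expand_prefix (keypad : List (Int × Int)) (y : Int × Int) (r : Int × Int)
    (s0 s : List Char) :
    pvExpand keypad y (r, s0 ++ s) = (pvExpand keypad y (r, s)).map (fun e => (e.1, s0 ++ e.2)) := by
  simp only [pvExpand, List.map_filterMap]
  congr 1
  funext vm
  split <;> simp

theorem pv_hit_prefix (keypad : List (Int × Int)) (y : Int × Int) (r : Int × Int)
    (s0 s : List Char) :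
    pvHit keypad y (r, s0 ++ s) = (pvHit keypad y (r, s)).map (fun t => s0 ++ t) := by
  simp only [pvHit, List.map_filterMap]
  congr 1
  funext vm
  split <;> simp

theorem pv_W_peel (keypad : List (Int × Int)) (y : Int × Int) :
    ∀ (k : Nat) (p : Int × Int),
      pvW keypad y p (k + 1) = (pvExpand keypad y (p, [])).flatMap
        (fun e => (pvW keypad y e.1 k).map (fun e2 => (e2.1, e.2 ++ e2.2))) := by
  intro k
  induction k with
  | zero =>
    intro p
    show (pvW keypad y p 0).flatMap (pvExpand keypad y) = _
    simp [pvW]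
  | succ k ih =>
    intro p
    calc pvW keypad y p (k + 1 + 1)
        = (pvW keypad y p (k + 1)).flatMap (pvExpand keypad y) := rfl
      _ = ((pvExpand keypad y (p, [])).flatMap
            (fun e => (pvW keypad y e.1 k).map (fun e2 => (e2.1, e.2 ++ e2.2)))).flatMap
            (pvExpand keypad y) := by rw [ih]
      _ = (pvExpand keypad y (p, [])).flatMap
            (fun e => ((pvW keypad y e.1 k).map (fun e2 => (e2.1, e.2 ++ e2.2))).flatMap
              (pvExpand keypad y)) := by rw [List.flatMap_assoc]
      _ = (pvExpand keypad y (p, [])).flatMap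
            (fun e => (pvW keypad y e.1 (k + 1)).map (fun e2 => (e2.1, e.2 ++ e2.2))) := by
          apply pv_flatMap_congr
          intro e _
          show ((pvW keypad y e.1 k).map (fun e2 => (e2.1, e.2 ++ e2.2))).flatMap
              (pvExpand keypad y) =
            ((pvW keypad y e.1 k).flatMap (pvExpand keypad y)).map (fun z => (z.1, e.2 ++ z.2))
          rw [List.flatMap_map, List.map_flatMap]
          apply pv_flatMap_congr
          intro e2 _
          exact pv_expand_prefix keypad y e2.1 e.2 e2.2

theorem pv_H_peel (keypad : List (Int × Int)) (y : Int × Int) (k : Nat) (p : Int × Int) :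
    pvH keypad y p (k + 1) = (pvExpand keypad y (p, [])).flatMap
      (fun e => (pvH keypad y e.1 k).map (fun t => e.2 ++ t)) := by
  rw [pvH, pv_W_peel, List.flatMap_assoc]
  apply pv_flatMap_congr
  intro e _
  show ((pvW keypad y e.1 k).map (fun e2 => (e2.1, e.2 ++ e2.2))).flatMap (pvHit keypad y) =
    ((pvW keypad y e.1 k).flatMap (pvHit keypad y)).map (fun t => e.2 ++ t)
  rw [List.flatMap_map, List.map_flatMap]
  apply pv_flatMap_congr
  intro e2 _
  exact pv_hit_prefix keypad y e2.1 e.2 e2.2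

theorem pv_G (keypad : List (Int × Int)) (y : Int × Int) :
    ∀ (k : Nat) (p : Int × Int), (∀ j ≤ k, pvReachInB keypad j p y = false) →
      pvH keypad y p k = pvE keypad y p (k + 1) := by
  intro k
  induction k with
  | zero =>
    intro p _
    have hL : pvH keypad y p 0 = pvHit keypad y (p, []) := by simp [pvH, pvW]
    rw [hL, pvHit, pv_filterMap_eq_flatMap, pvE]
    apply pv_flatMap_congr
    intro vm _
    by_cases h1 : vm.1 ∈ keypad
    · by_cases h2 : vm.1 = y
      · rw [h2] at h1 ⊢; simp [h1, pvE]
      · simp [h1, h2, pvE]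
    · simp [h1]
  | succ k ih =>
    intro p hyp
    rw [pv_H_peel, pvE]
    rw [pvExpand]
    show ((pvNbrs p.1 p.2).filterMap _).flatMap _ = _
    rw [pv_filterMap_eq_flatMap, List.flatMap_assoc]
    apply pv_flatMap_congr
    intro vm hvm
    have hpos : vm.1 ∈ pvNbrsPos p := by
      rw [← pv_nbrs_fst]; exact List.mem_map_of_mem hvm
    by_cases h1 : vm.1 ∈ keypad
    · by_cases h2 : vm.1 = y
      · exfalso
        have hr1 : pvReachInB keypad 1 p y = true := by
          rw [pvReachInB, List.any_eq_true]
          refine ⟨vm.1, hpos, ?_⟩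
          rw [Bool.and_eq_true, decide_eq_true_eq]
          exact ⟨h1, by rw [h2]; simp [pvReachInB]⟩
        have := hyp 1 (by omega)
        rw [hr1] at this; cases this
      · have hyp2 : ∀ j ≤ k, pvReachInB keypad j vm.1 y = false := by
          intro j hj
          by_contra hc
          have hc2 : pvReachInB keypad j vm.1 y = true := by
            cases hb : pvReachInB keypad j vm.1 y
            · exact absurd hb hc
            · rfl
          have hr : pvReachInB keypad (j + 1) p y = true := by
            rw [pvReachInB, List.any_eq_true]
            refine ⟨vm.1, hpos, ?_⟩
            rw [Bool.and_eq_true, decide_eq_true_eq]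
            exact ⟨h1, hc2⟩
          have := hyp (j + 1) (by omega)
          rw [hr] at this; cases this
        have hih := ih vm.1 hyp2
        simp only [h1, h2, ne_eq, not_false_eq_true, and_self, if_true,
          Option.toList_some, List.flatMap_cons, List.flatMap_nil, List.append_nil]
        rw [hih]
        simp
    · simp [h1]

-- A's loop ------------------------------------------------------------------

def pvFq (keypad : List (Int × Int)) (y : Int × Int) (path : List Char) (b : Option Nat)
    (vm : (Int × Int) × Char) : Option (Int × Int × List Char) :=
  if vm.1 ∈ keypad ∧ vm.1 ≠ y ∧ pvLtO (path.length + 1) b = true then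
    some (vm.1.1, vm.1.2, path ++ [vm.2]) else none

def pvFh (keypad : List (Int × Int)) (y : Int × Int) (path : List Char)
    (vm : (Int × Int) × Char) : Option (List Char) :=
  if vm.1 ∈ keypad ∧ vm.1 = y then some (path ++ [vm.2] ++ ['A']) else none

theorem pv_Fq_minO (keypad : List (Int × Int)) (y : Int × Int) (path : List Char) (b : Option Nat) :
    pvFq keypad y path (pvMinO b (path.length + 2)) = pvFq keypad y path b := by
  funext vm
  simp only [pvFq, show path.length + 2 = path.length + 1 + 1 from rfl, pv_ltO_minO]

theorem pv_innerA (keypad : List (Int × Int)) (y : Int × Int) (path : List Char) :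
    ∀ (ns : List ((Int × Int) × Char)) (q : List (Int × Int × List Char)) (b : Option Nat)
      (o : List (List Char)),
      ns.foldl (pvStepA keypad y path) (q, b, o) =
        (q ++ ns.filterMap (pvFq keypad y path b),
         (if ns.any (fun vm => decide (vm.1 ∈ keypad) && decide (vm.1 = y)) then
            pvMinO b (path.length + 2) else b),
         o ++ ns.filterMap (pvFh keypad y path)) := by
  intro ns
  induction ns with
  | nil => intro q b o; simp
  | cons vm t ih =>
    intro q b o
    rw [List.foldl_cons]
    by_cases h1 : vm.1 ∈ keypad
    · by_cases h2 : vm.1 = y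
      · have h1y : y ∈ keypad := h2 ▸ h1
        have hstep : pvStepA keypad y path (q, b, o) vm =
            (q, pvMinO b (path.length + 2), o ++ [path ++ [vm.2] ++ ['A']]) := by
          simp [pvStepA, h2, h1y]
        have hq : pvFq keypad y path b vm = none := by
          rw [pvFq, if_neg]; rintro ⟨-, hne, -⟩; exact hne h2
        have hh : pvFh keypad y path vm = some (path ++ [vm.2] ++ ['A']) := by
          rw [pvFh, if_pos ⟨h1, h2⟩]
        rw [hstep, ih, List.filterMap_cons_none hq, List.filterMap_cons_some hh]
        have hany : (decide (vm.1 ∈ keypad) && decide (vm.1 = y)) = true := by simp [h2, h1y]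
        rw [List.any_cons, hany, Bool.true_or, pv_Fq_minO]
        simp only [Prod.mk.injEq]
        refine ⟨by simp, ?_, by simp⟩
        split
        · rw [pv_minO_idem]; simp
        · simp
      · by_cases h3 : pvLtO (path.length + 1) b = true
        · have hstep : pvStepA keypad y path (q, b, o) vm =
              (q ++ [(vm.1.1, vm.1.2, path ++ [vm.2])], b, o) := by
            simp only [pvStepA, if_pos h1, if_neg h2]
            rw [if_pos (by simpa using h3)]
          have hq : pvFq keypad y path b vm = some (vm.1.1, vm.1.2, path ++ [vm.2]) := by
            rw [pvFq, if_pos ⟨h1, h2, h3⟩]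
          have hh : pvFh keypad y path vm = none := by
            rw [pvFh, if_neg]; rintro ⟨-, hy⟩; exact h2 hy
          rw [hstep, ih, List.filterMap_cons_some hq, List.filterMap_cons_none hh]
          have hany : (decide (vm.1 ∈ keypad) && decide (vm.1 = y)) = false := by simp [h2]
          rw [List.any_cons, hany, Bool.false_or]
          simp
        · have hstep : pvStepA keypad y path (q, b, o) vm = (q, b, o) := by
            simp only [pvStepA, if_pos h1, if_neg h2]
            rw [if_neg (by simpa using h3)]
          have hq : pvFq keypad y path b vm = none := by
            rw [pvFq, if_neg]; rintro ⟨-, -, hlt⟩; exact h3 hlt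
          have hh : pvFh keypad y path vm = none := by
            rw [pvFh, if_neg]; rintro ⟨-, hy⟩; exact h2 hy
          rw [hstep, ih, List.filterMap_cons_none hq, List.filterMap_cons_none hh]
          have hany : (decide (vm.1 ∈ keypad) && decide (vm.1 = y)) = false := by simp [h2]
          rw [List.any_cons, hany, Bool.false_or]
    · have hstep : pvStepA keypad y path (q, b, o) vm = (q, b, o) := by
        simp [pvStepA, h1]
      have hq : pvFq keypad y path b vm = none := by
        rw [pvFq, if_neg]; rintro ⟨hk, -, -⟩; exact h1 hk
      have hh : pvFh keypad y path vm = none := by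
        rw [pvFh, if_neg]; rintro ⟨hk, -⟩; exact h1 hk
      rw [hstep, ih, List.filterMap_cons_none hq, List.filterMap_cons_none hh]
      have hany : (decide (vm.1 ∈ keypad) && decide (vm.1 = y)) = false := by simp [h1]
      rw [List.any_cons, hany, Bool.false_or]

theorem pv_chil_eq (keypad : List (Int × Int)) (y : Int × Int) (path : List Char) (r c : Int)
    (b : Option Nat) :
    (pvNbrs r c).filterMap (pvFq keypad y path b) = (pvChil keypad y b ((r, c), path)).map pvToE := by
  rw [pvChil]
  split
  · rename_i ht
    rw [show (((r, c), path) : (Int × Int) × List Char).2.length + 1 = path.length + 1 from rfl] at ht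
    rw [pvExpand, List.map_filterMap]
    congr 1
    funext vm
    rw [pvFq]
    by_cases hc : vm.1 ∈ keypad ∧ vm.1 ≠ y
    · rw [if_pos ⟨hc.1, hc.2, ht⟩, if_pos hc]; rfl
    · rw [if_neg (by tauto), if_neg hc]; rfl
  · rename_i ht
    rw [show (((r, c), path) : (Int × Int) × List Char).2.length + 1 = path.length + 1 from rfl] at ht
    simp only [List.map_nil]
    rw [List.filterMap_eq_nil_iff]
    intro vm _
    rw [pvFq, if_neg]
    rintro ⟨-, -, hlt⟩
    exact ht hlt

theorem pv_fh_eq (keypad : List (Int × Int)) (y : Int × Int) (path : List Char) (r c : Int) :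
    (pvNbrs r c).filterMap (pvFh keypad y path) = pvHit keypad y ((r, c), path) := rfl

theorem pv_stepEntry (keypad : List (Int × Int)) (y : Int × Int) (fuel : Nat) (r c : Int)
    (path : List Char) (rest : List (Int × Int × List Char)) (b : Option Nat)
    (o : List (List Char)) :
    pvLoopA keypad y (fuel + 1) ((r, c, path) :: rest) b o =
      pvLoopA keypad y fuel (rest ++ (pvChil keypad y b ((r, c), path)).map pvToE)
        (if pvHit keypad y ((r, c), path) = [] then b else pvMinO b (path.length + 2))
        (o ++ pvHit keypad y ((r, c), path)) := by
  conv_lhs => rw [pvLoopA]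
  simp only [pv_innerA]
  rw [pv_chil_eq, pv_fh_eq]
  by_cases hhit : pvHit keypad y ((r, c), path) = []
  · have hany := (pv_hit_empty_iff keypad y ((r, c), path)).mp hhit
    rw [show (((r, c), path) : (Int × Int) × List Char).1.1 = r from rfl,
        show (((r, c), path) : (Int × Int) × List Char).1.2 = c from rfl] at hany
    rw [hany, if_pos hhit]
    simp
  · have hany : ¬ ((pvNbrs r c).any fun vm => decide (vm.1 ∈ keypad) && decide (vm.1 = y)) = false := by
      intro hf
      exact hhit ((pv_hit_empty_iff keypad y ((r, c), path)).mpr hf)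
    have hany2 : ((pvNbrs r c).any fun vm => decide (vm.1 ∈ keypad) && decide (vm.1 = y)) = true := by
      cases hb : (pvNbrs r c).any fun vm => decide (vm.1 ∈ keypad) && decide (vm.1 = y)
      · exact absurd hb hany
      · rfl
    rw [hany2, if_neg hhit]
    simp

theorem pv_levelA (keypad : List (Int × Int)) (y : Int × Int) (k : Nat) :
    ∀ (l : List ((Int × Int) × List Char)) (F : List (Int × Int × List Char)) (b : Option Nat)
      (o : List (List Char)) (fuel : Nat),
      (∀ e ∈ l, e.2.length = k) →
      pvLoopA keypad y (l.length + fuel) (l.map pvToE ++ F) b o =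
        pvLoopA keypad y fuel (F ++ (l.flatMap (pvChil keypad y b)).map pvToE)
          (if l.flatMap (pvHit keypad y) = [] then b else pvMinO b (k + 2))
          (o ++ l.flatMap (pvHit keypad y)) := by
  intro l
  induction l with
  | nil => intro F b o fuel _; simp
  | cons e t ih =>
    intro F b o fuel hlen
    have hek : e.2.length = k := hlen e (by simp)
    have harith : (e :: t).length + fuel = t.length + fuel + 1 := by
      simp [List.length_cons]; omega
    rw [harith, List.map_cons, List.cons_append]
    rw [show pvToE e = (e.1.1, e.1.2, e.2) from rfl, pv_stepEntry]
    simp only [Prod.mk.eta]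
    rw [hek, List.append_assoc]
    rw [ih (F ++ (pvChil keypad y b e).map pvToE)
        (if pvHit keypad y e = [] then b else pvMinO b (k + 2))
        (o ++ pvHit keypad y e) fuel (fun e2 he2 => hlen e2 (by simp [he2]))]
    have hchil : ∀ e2 ∈ t, pvChil keypad y (if pvHit keypad y e = [] then b else pvMinO b (k + 2)) e2
        = pvChil keypad y b e2 := by
      intro e2 he2
      split
      · rfl
      · rw [pvChil, pvChil, hlen e2 (by simp [he2]),
          show k + 2 = k + 1 + 1 from rfl, pv_ltO_minO]
    have hflat : t.flatMap (pvChil keypad y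
        (if pvHit keypad y e = [] then b else pvMinO b (k + 2))) = t.flatMap (pvChil keypad y b) :=
      pv_flatMap_congr hchil
    rw [hflat]
    rw [List.flatMap_cons, List.flatMap_cons, List.map_append, List.append_assoc]
    congr 1
    · by_cases h1 : pvHit keypad y e = [] <;> by_cases h2 : t.flatMap (pvHit keypad y) = [] <;>
        simp [h1, h2, pv_minO_idem, show k + 2 = k + 1 + 1 from rfl]
    · simp

def pvSumW (keypad : List (Int × Int)) (y x : Int × Int) : Nat → Nat → Nat
  | _, 0 => 0
  | j, n + 1 => (pvW keypad y x j).length + pvSumW keypad y x (j + 1) n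

theorem pv_W_card (keypad : List (Int × Int)) (y x : Int × Int) :
    ∀ (k : Nat), (pvW keypad y x k).length ≤ 4 ^ k := by
  intro k
  induction k with
  | zero => simp [pvW]
  | succ k ih =>
    have h := pv_flatMap_len_le (pvW keypad y x k) (pvExpand keypad y) (fun e _ => by
      rw [pvExpand]
      exact le_trans (List.length_filterMap_le _ _) (by rfl))
    rw [pvW, pow_succ]
    calc ((pvW keypad y x k).flatMap (pvExpand keypad y)).length
        ≤ 4 * (pvW keypad y x k).length := h
      _ ≤ 4 * 4 ^ k := by omega
      _ = 4 ^ k * 4 := by ring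

theorem pv_sumW_le (keypad : List (Int × Int)) (y x : Int × Int) :
    ∀ (n j : Nat), 3 * pvSumW keypad y x j n + 4 ^ j ≤ 4 ^ (j + n) := by
  intro n
  induction n with
  | zero => intro j; simp [pvSumW]
  | succ n ih =>
    intro j
    have h1 := pv_W_card keypad y x j
    have h2 := ih (j + 1)
    rw [pvSumW]
    have e1 : (4 : Nat) ^ (j + 1) = 4 * 4 ^ j := by rw [pow_succ]; ring
    have e2 : (4 : Nat) ^ (j + (n + 1)) = 4 ^ (j + 1 + n) := by
      congr 1; omega
    omega

-- B's BFS -------------------------------------------------------------------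

theorem pv_bfsInner_fold (k : Nat) :
    ∀ (vs : List (Int × Int)) (dist : PySem.Dict (Int × Int) Nat) (nxt : List (Int × Int)),
      (∀ w j, ((vs.foldl (pvBfsInner k) (dist, nxt)).1.get? w = some j ↔
          (dist.get? w = some j ∨ (j = k ∧ dist.get? w = none ∧ w ∈ vs)))) ∧
      (∀ w, ((vs.foldl (pvBfsInner k) (dist, nxt)).1.get? w = none ↔
          (dist.get? w = none ∧ w ∉ vs))) ∧
      (∀ w, (w ∈ (vs.foldl (pvBfsInner k) (dist, nxt)).2 ↔
          (w ∈ nxt ∨ (dist.get? w = none ∧ w ∈ vs)))) := by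
  intro vs
  induction vs with
  | nil => intro dist nxt; refine ⟨fun w j => by simp, fun w => by simp, fun w => by simp⟩
  | cons v t ih =>
    intro dist nxt
    rw [List.foldl_cons]
    by_cases hv : dist.get? v = none
    · have hstep : pvBfsInner k (dist, nxt) v = (dist.insert v k, nxt ++ [v]) := by
        simp [pvBfsInner, hv]
      rw [hstep]
      obtain ⟨ih1, ih2, ih3⟩ := ih (dist.insert v k) (nxt ++ [v])
      refine ⟨fun w j => ?_, fun w => ?_, fun w => ?_⟩
      · rw [ih1 w j]
        rw [PySem.Dict.get?_insert]
        by_cases hw : w = v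
        · subst hw
          simp [hv, eq_comm]
        · simp only [if_neg hw, List.mem_cons]
          tauto
      · rw [ih2 w, PySem.Dict.get?_insert]
        by_cases hw : w = v
        · subst hw; simp
        · simp only [if_neg hw, List.mem_cons]
          tauto
      · rw [ih3 w, PySem.Dict.get?_insert, List.mem_append, List.mem_singleton]
        by_cases hw : w = v
        · subst hw; simp [hv]
        · simp only [if_neg hw, List.mem_cons]
          tauto
    · have hstep : pvBfsInner k (dist, nxt) v = (dist, nxt) := by
        simp [pvBfsInner, hv]
      rw [hstep]
      obtain ⟨ih1, ih2, ih3⟩ := ih dist nxt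
      refine ⟨fun w j => ?_, fun w => ?_, fun w => ?_⟩
      · rw [ih1 w j]
        by_cases hw : w = v
        · subst hw; simp only [List.mem_cons]; tauto
        · simp only [List.mem_cons]; tauto
      · rw [ih2 w]
        by_cases hw : w = v
        · subst hw; simp only [List.mem_cons]; tauto
        · simp only [List.mem_cons]; tauto
      · rw [ih3 w]
        by_cases hw : w = v
        · subst hw; simp only [List.mem_cons]; tauto
        · simp only [List.mem_cons]; tauto

def pvDChar (keypad : List (Int × Int)) (k : Nat) (dist0 : PySem.Dict (Int × Int) Nat)
    (fr : List (Int × Int)) (st : PySem.Dict (Int × Int) Nat × List (Int × Int))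
    (nxt0 : List (Int × Int)) : Prop :=
  (∀ w j, st.1.get? w = some j ↔ (dist0.get? w = some j ∨
      (j = k ∧ dist0.get? w = none ∧ ∃ u ∈ fr, u ∈ keypad ∧ w ∈ pvNbrsPos u))) ∧
  (∀ w, st.1.get? w = none ↔ (dist0.get? w = none ∧ ¬ ∃ u ∈ fr, u ∈ keypad ∧ w ∈ pvNbrsPos u)) ∧
  (∀ w, w ∈ st.2 ↔ (w ∈ nxt0 ∨ (dist0.get? w = none ∧ ∃ u ∈ fr, u ∈ keypad ∧ w ∈ pvNbrsPos u)))

theorem pv_bfs_level (keypad : List (Int × Int)) (k : Nat) :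
    ∀ (fr : List (Int × Int)) (dist0 : PySem.Dict (Int × Int) Nat) (nxt0 : List (Int × Int)),
      pvDChar keypad k dist0 fr (fr.foldl (pvBfsU (PySem.Set.ofList keypad) k) (dist0, nxt0)) nxt0 := by
  intro fr
  induction fr with
  | nil =>
    intro dist0 nxt0
    refine ⟨fun w j => by simp, fun w => by simp, fun w => by simp⟩
  | cons u t ih =>
    intro dist0 nxt0
    rw [List.foldl_cons, pvBfsU]
    by_cases hcu : PySem.Set.contains (PySem.Set.ofList keypad) u = true
    · have hu : u ∈ keypad := by
        rw [PySem.Set.contains_iff] at hcu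
        exact (PySem.Set.mem_ofList _ _).mp hcu
      rw [if_pos hcu]
      obtain ⟨in1, in2, in3⟩ := pv_bfsInner_fold k (pvNbrsPos u) dist0 nxt0
      set st1 := (pvNbrsPos u).foldl (pvBfsInner k) (dist0, nxt0) with hst1
      obtain ⟨ih1, ih2, ih3⟩ := ih st1.1 st1.2
      rw [Prod.mk.eta] at ih1 ih2 ih3
      refine ⟨fun w j => ?_, fun w => ?_, fun w => ?_⟩
      · rw [ih1 w j]
        rw [in1 w j, in2 w]
        simp only [List.mem_cons]
        constructor
        · rintro ((h | ⟨h1, h2, h3⟩) | ⟨h1, ⟨h2, h3⟩, u2, hu2, hkp2, hn2⟩)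
          · exact Or.inl h
          · exact Or.inr ⟨h1, h2, u, Or.inl rfl, hu, h3⟩
          · exact Or.inr ⟨h1, h2, u2, Or.inr hu2, hkp2, hn2⟩
        · rintro (h | ⟨h1, h2, u2, (rfl | hu2), hkp2, hn2⟩)
          · exact Or.inl (Or.inl h)
          · exact Or.inl (Or.inr ⟨h1, h2, hn2⟩)
          · by_cases hp : w ∈ pvNbrsPos u
            · exact Or.inl (Or.inr ⟨h1, h2, hp⟩)
            · exact Or.inr ⟨h1, ⟨h2, hp⟩, u2, hu2, hkp2, hn2⟩
      · rw [ih2 w, in2 w]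
        simp only [List.mem_cons]
        constructor
        · rintro ⟨⟨h1, h2⟩, h3⟩
          refine ⟨h1, ?_⟩
          rintro ⟨u2, (rfl | hu2), hkp2, hn2⟩
          · exact h2 hn2
          · exact h3 ⟨u2, hu2, hkp2, hn2⟩
        · rintro ⟨h1, h2⟩
          refine ⟨⟨h1, fun hp => h2 ⟨u, Or.inl rfl, hu, hp⟩⟩, fun ⟨u2, hu2, hkp2, hn2⟩ =>
            h2 ⟨u2, Or.inr hu2, hkp2, hn2⟩⟩
      · rw [ih3 w, in3 w, in2 w]
        simp only [List.mem_cons]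
        constructor
        · rintro ((h | ⟨h1, h2⟩) | ⟨⟨h1, h2⟩, u2, hu2, hkp2, hn2⟩)
          · exact Or.inl h
          · exact Or.inr ⟨h1, u, Or.inl rfl, hu, h2⟩
          · exact Or.inr ⟨h1, u2, Or.inr hu2, hkp2, hn2⟩
        · rintro (h | ⟨h1, u2, (rfl | hu2), hkp2, hn2⟩)
          · exact Or.inl (Or.inl h)
          · exact Or.inl (Or.inr ⟨h1, hn2⟩)
          · by_cases hp : w ∈ pvNbrsPos u
            · exact Or.inl (Or.inr ⟨h1, hp⟩)
            · exact Or.inr ⟨⟨h1, hp⟩, u2, hu2, hkp2, hn2⟩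
    · have hu : u ∉ keypad := by
        intro hmem
        exact hcu (by rw [PySem.Set.contains_iff]; exact (PySem.Set.mem_ofList _ _).mpr hmem)
      rw [if_neg hcu]
      obtain ⟨ih1, ih2, ih3⟩ := ih dist0 nxt0
      refine ⟨fun w j => ?_, fun w => ?_, fun w => ?_⟩
      · rw [ih1 w j]
        simp only [List.mem_cons]
        constructor
        · rintro (h | ⟨h1, h2, u2, hu2, hkp2, hn2⟩)
          · exact Or.inl h
          · exact Or.inr ⟨h1, h2, u2, Or.inr hu2, hkp2, hn2⟩
        · rintro (h | ⟨h1, h2, u2, (rfl | hu2), hkp2, hn2⟩)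
          · exact Or.inl h
          · exact absurd hkp2 hu
          · exact Or.inr ⟨h1, h2, u2, hu2, hkp2, hn2⟩
      · rw [ih2 w]
        simp only [List.mem_cons]
        constructor
        · rintro ⟨h1, h2⟩
          refine ⟨h1, ?_⟩
          rintro ⟨u2, (rfl | hu2), hkp2, hn2⟩
          · exact hu hkp2
          · exact h2 ⟨u2, hu2, hkp2, hn2⟩
        · rintro ⟨h1, h2⟩
          exact ⟨h1, fun ⟨u2, hu2, hkp2, hn2⟩ => h2 ⟨u2, Or.inr hu2, hkp2, hn2⟩⟩
      · rw [ih3 w]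
        simp only [List.mem_cons]
        constructor
        · rintro (h | ⟨h1, u2, hu2, hkp2, hn2⟩)
          · exact Or.inl h
          · exact Or.inr ⟨h1, u2, Or.inr hu2, hkp2, hn2⟩
        · rintro (h | ⟨h1, u2, (rfl | hu2), hkp2, hn2⟩)
          · exact Or.inl h
          · exact absurd hkp2 hu
          · exact Or.inr ⟨h1, u2, hu2, hkp2, hn2⟩

def pvInv (keypad : List (Int × Int)) (y : Int × Int) (K : Nat)
    (st : PySem.Dict (Int × Int) Nat × List (Int × Int)) : Prop :=
  (∀ w j, st.1.get? w = some j ↔ (pvMinR keypad y w j ∧ j ≤ K)) ∧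
  (∀ w, w ∈ st.2 ↔ pvMinR keypad y w K)

theorem pv_reach_build (keypad : List (Int × Int)) (w v y : Int × Int) (j : Nat)
    (hv : v ∈ pvNbrsPos w) (hkp : v ∈ keypad) (hr : pvReachInB keypad j v y = true) :
    pvReachInB keypad (j + 1) w y = true := by
  rw [pvReachInB, List.any_eq_true]
  exact ⟨v, hv, by rw [Bool.and_eq_true, decide_eq_true_eq]; exact ⟨hkp, hr⟩⟩

theorem pv_reach_destruct (keypad : List (Int × Int)) (w y : Int × Int) (j : Nat)
    (h : pvReachInB keypad (j + 1) w y = true) :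
    ∃ v ∈ pvNbrsPos w, v ∈ keypad ∧ pvReachInB keypad j v y = true := by
  rw [pvReachInB, List.any_eq_true] at h
  obtain ⟨v, hv, hb⟩ := h
  rw [Bool.and_eq_true, decide_eq_true_eq] at hb
  exact ⟨v, hv, hb.1, hb.2⟩

theorem pv_minR_exists (keypad : List (Int × Int)) (y w : Int × Int) (i : Nat)
    (h : pvReachInB keypad i w y = true) : ∃ j ≤ i, pvMinR keypad y w j := by
  have hex : ∃ n, pvReachInB keypad n w y = true := ⟨i, h⟩
  refine ⟨Nat.find hex, Nat.find_min' hex h, Nat.find_spec hex, fun i2 hi2 => ?_⟩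
  have hmin := Nat.find_min hex hi2
  cases hb : pvReachInB keypad i2 w y
  · rfl
  · exact absurd hb hmin

theorem pv_inv_zero (keypad : List (Int × Int)) (y : Int × Int) :
    pvInv keypad y 0 ((PySem.Dict.empty.insert y 0 : PySem.Dict (Int × Int) Nat), [y]) := by
  constructor
  · intro w j
    rw [PySem.Dict.get?_insert]
    constructor
    · intro h
      split at h
      · rename_i hw
        cases h
        subst hw
        exact ⟨⟨by simp [pvReachInB], fun i hi => absurd hi (Nat.not_lt_zero _)⟩, le_refl _⟩
      · rw [PySem.Dict.get?_empty] at h; cases h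
    · rintro ⟨⟨hr, _⟩, hj⟩
      have hj0 : j = 0 := by omega
      subst hj0
      have hw : w = y := by simpa [pvReachInB] using hr
      subst hw
      simp
  · intro w
    simp only [List.mem_singleton]
    constructor
    · rintro rfl
      exact ⟨by simp [pvReachInB], fun i hi => absurd hi (Nat.not_lt_zero _)⟩
    · rintro ⟨hr, _⟩
      simpa [pvReachInB] using hr

theorem pv_inv_step (keypad : List (Int × Int)) (y : Int × Int) (K : Nat)
    (st : PySem.Dict (Int × Int) Nat × List (Int × Int)) (h : pvInv keypad y K st) :
    pvInv keypad y (K + 1) (st.2.foldl (pvBfsU (PySem.Set.ofList keypad) (K + 1)) (st.1, [])) := by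
  obtain ⟨h1, h2⟩ := h
  obtain ⟨d1, d2, d3⟩ := pv_bfs_level keypad (K + 1) st.2 st.1 []
  have hkey : ∀ w, (st.1.get? w = none ∧ ∃ u ∈ st.2, u ∈ keypad ∧ w ∈ pvNbrsPos u) ↔
      pvMinR keypad y w (K + 1) := by
    intro w
    constructor
    · rintro ⟨hn, u, hu, hkp, hw⟩
      have hmu : pvMinR keypad y u K := (h2 u).mp hu
      have hr : pvReachInB keypad (K + 1) w y = true :=
        pv_reach_build keypad w u y K ((pv_nbrsPos_symm u w).mp hw) hkp hmu.1
      refine ⟨hr, fun i hi => ?_⟩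
      by_contra hc
      have hc2 : pvReachInB keypad i w y = true := by
        cases hb : pvReachInB keypad i w y
        · exact absurd hb hc
        · rfl
      obtain ⟨j0, hj0, hm0⟩ := pv_minR_exists keypad y w i hc2
      have : st.1.get? w = some j0 := (h1 w j0).mpr ⟨hm0, by omega⟩
      rw [hn] at this; cases this
    · rintro ⟨hr, hmin⟩
      obtain ⟨v, hv, hkp, hrv⟩ := pv_reach_destruct keypad w y K hr
      obtain ⟨j0, hj0, hm0⟩ := pv_minR_exists keypad y v K hrv
      have hj0K : j0 = K := by
        by_contra hne
        have hlt : j0 < K := by omega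
        have : pvReachInB keypad (j0 + 1) w y = true :=
          pv_reach_build keypad w v y j0 hv hkp hm0.1
        have hfalse := hmin (j0 + 1) (by omega)
        rw [this] at hfalse; cases hfalse
      subst hj0K
      have hvfr : v ∈ st.2 := (h2 v).mpr hm0
      constructor
      · cases hg : st.1.get? w with
        | none => rfl
        | some j =>
          have := (h1 w j).mp hg
          have hfalse := hmin j (by omega)
          rw [this.1.1] at hfalse; cases hfalse
      · exact ⟨v, hvfr, hkp, (pv_nbrsPos_symm v w).mpr hv⟩
  constructor
  · intro w j
    rw [d1 w j]
    constructor
    · rintro (h | ⟨rfl, hn, hR⟩)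
      · have := (h1 w j).mp h
        exact ⟨this.1, by omega⟩
      · exact ⟨(hkey w).mp ⟨hn, hR⟩, le_refl _⟩
    · rintro ⟨hm, hj⟩
      by_cases hjK : j ≤ K
      · exact Or.inl ((h1 w j).mpr ⟨hm, hjK⟩)
      · have hj1 : j = K + 1 := by omega
        subst hj1
        obtain ⟨hn, hR⟩ := (hkey w).mpr hm
        exact Or.inr ⟨rfl, hn, hR⟩
  · intro w
    rw [d3 w]
    simp only [List.not_mem_nil, false_or]
    exact hkey w

theorem pv_inv_range (keypad : List (Int × Int)) (y : Int × Int) :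
    ∀ (n : Nat) (K0 : Nat) (st : PySem.Dict (Int × Int) Nat × List (Int × Int)),
      pvInv keypad y K0 st →
      pvInv keypad y (K0 + n)
        ((PySem.List.pyRange ((K0 : Int) + 1) ((K0 : Int) + 1 + (n : Int)) 1).foldl
          (fun st k => st.2.foldl (pvBfsU (PySem.Set.ofList keypad) k.toNat) (st.1, [])) st) := by
  intro n
  induction n with
  | zero =>
    intro K0 st h
    rw [show ((K0 : Int) + 1 + ((0 : Nat) : Int)) = (K0 : Int) + 1 by push_cast; ring]
    rw [PySem.List.pyRange_one_eq_nil (le_refl _)]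
    simpa using h
  | succ n ih =>
    intro K0 st h
    rw [PySem.List.pyRange_one_cons (by push_cast; omega)]
    rw [List.foldl_cons]
    have htn : ((K0 : Int) + 1).toNat = K0 + 1 := by
      rw [show ((K0 : Int) + 1) = (((K0 + 1 : Nat) : Int)) by push_cast; ring, Int.toNat_natCast]
    rw [htn]
    have hstep := pv_inv_step keypad y K0 st h
    have hih := ih (K0 + 1) _ hstep
    rw [show ((K0 : Int) + 1 + 1) = ((K0 + 1 : Nat) : Int) + 1 by push_cast; ring,
        show ((K0 : Int) + 1 + (((n + 1 : Nat)) : Int)) = (((K0 + 1 : Nat) : Int) + 1 + ((n : Nat) : Int)) by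
          push_cast; ring,
        show K0 + (n + 1) = K0 + 1 + n by omega]
    exact hih

theorem pv_enumB_eq (keypad : List (Int × Int)) (y : Int × Int) (K : Nat)
    (dist : PySem.Dict (Int × Int) Nat)
    (hD : ∀ w j, dist.get? w = some j ↔ (pvMinR keypad y w j ∧ j ≤ K)) :
    ∀ (k : Nat) (p : Int × Int), k ≤ K → pvMinR keypad y p k →
      pvEnumB (PySem.Set.ofList keypad) dist p k = pvE keypad y p k := by
  intro k
  induction k with
  | zero =>
    intro p _ hm
    have hp : p = y := by simpa [pvReachInB] using hm.1
    subst hp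
    simp [pvEnumB, pvE]
  | succ k ih =>
    intro p hk hm
    rw [pvEnumB, pvE]
    have hfun : (fun (out : List (List Char)) (vm : (Int × Int) × Char) =>
        if PySem.Set.contains (PySem.Set.ofList keypad) vm.1 ∧ dist.get? vm.1 = some k then
          out ++ (pvEnumB (PySem.Set.ofList keypad) dist vm.1 k).map (fun s => vm.2 :: s)
        else out) = (fun out vm =>
          out ++ (if PySem.Set.contains (PySem.Set.ofList keypad) vm.1 ∧ dist.get? vm.1 = some k then
            (pvEnumB (PySem.Set.ofList keypad) dist vm.1 k).map (fun s => vm.2 :: s) else [])) := by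
      funext out vm
      split
      · rfl
      · simp
    rw [hfun, PySem.List.foldl_append_eq_flatMap, List.nil_append]
    apply pv_flatMap_congr
    intro vm hvm
    have hpos : vm.1 ∈ pvNbrsPos p := by
      rw [← pv_nbrs_fst]; exact List.mem_map_of_mem hvm
    by_cases h1 : vm.1 ∈ keypad
    · have hc : PySem.Set.contains (PySem.Set.ofList keypad) vm.1 = true := by
        rw [PySem.Set.contains_iff]; exact (PySem.Set.mem_ofList _ _).mpr h1
      by_cases h2 : dist.get? vm.1 = some k
      · have hm2 := (hD vm.1 k).mp h2
        rw [if_pos ⟨hc, h2⟩, if_pos h1, ih vm.1 (by omega) hm2.1]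
      · have hr : pvReachInB keypad k vm.1 y = false := by
          by_contra hcc
          have hc2 : pvReachInB keypad k vm.1 y = true := by
            cases hb : pvReachInB keypad k vm.1 y
            · exact absurd hb hcc
            · rfl
          obtain ⟨j0, hj0, hm0⟩ := pv_minR_exists keypad y vm.1 k hc2
          have hj0k : j0 = k := by
            by_contra hne
            have : pvReachInB keypad (j0 + 1) p y = true :=
              pv_reach_build keypad p vm.1 y j0 hpos h1 hm0.1
            have hfalse := hm.2 (j0 + 1) (by omega)
            rw [this] at hfalse; cases hfalse
          subst hj0k
          exact h2 ((hD vm.1 j0).mpr ⟨hm0, by omega⟩)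
        rw [if_neg (fun hcn => h2 hcn.2), if_pos h1, pv_E_nil keypad y k vm.1 hr, List.map_nil]
    · have hc : ¬ (PySem.Set.contains (PySem.Set.ofList keypad) vm.1 = true) := by
        rw [PySem.Set.contains_iff]
        intro hmem
        exact h1 ((PySem.Set.mem_ofList _ _).mp hmem)
      rw [if_neg (fun hcn => hc hcn.1), if_neg h1]

theorem pv_loopA_nil (keypad : List (Int × Int)) (y : Int × Int) (fuel : Nat) (b : Option Nat)
    (o : List (List Char)) : pvLoopA keypad y fuel [] b o = o := by
  cases fuel <;> rfl

theorem pv_chainLow (keypad : List (Int × Int)) (y x : Int × Int) (d : Nat)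
    (hmin : ∀ j < d, pvReachInB keypad j x y = false) :
    ∀ (n j f : Nat), j + n + 1 ≤ d →
      pvLoopA keypad y (pvSumW keypad y x j n + f) ((pvW keypad y x j).map pvToE) none [] =
      pvLoopA keypad y f ((pvW keypad y x (j + n)).map pvToE) none [] := by
  intro n
  induction n with
  | zero => intro j f _; simp [pvSumW]
  | succ n ih =>
    intro j f hle
    have hnohit : (pvW keypad y x j).flatMap (pvHit keypad y) = [] := by
      rw [List.flatMap_eq_nil_iff]
      intro e he
      by_contra hne
      have h1 := pv_hit_ne keypad y e hne
      have h2 := pv_W_reach keypad y x j e he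
      have h3 : pvReachInB keypad (j + 1) x y = true :=
        pv_reach_succ keypad y j x e.1 h2 h1.1 h1.2
      have := hmin (j + 1) (by omega)
      rw [h3] at this; cases this
    have hWj1 : (pvW keypad y x j).flatMap (pvChil keypad y none) = pvW keypad y x (j + 1) := by
      have hc : ∀ e ∈ pvW keypad y x j, pvChil keypad y none e = pvExpand keypad y e :=
        fun e _ => by rw [pvChil, if_pos (show pvLtO (e.2.length + 1) none = true from rfl)]
      rw [pv_flatMap_congr hc]
      rfl
    have hlevel := pv_levelA keypad y j (pvW keypad y x j) [] none []
      (pvSumW keypad y x (j + 1) n + f) (pv_W_len keypad y x j)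
    rw [List.append_nil, hWj1, hnohit, if_pos rfl, List.nil_append, List.append_nil] at hlevel
    rw [pvSumW, Nat.add_assoc, hlevel]
    rw [show j + (n + 1) = j + 1 + n by omega]
    exact ih (j + 1) f (by omega)

theorem pv_runA (keypad : List (Int × Int)) (y x : Int × Int) (d : Nat)
    (hspec : pvReachInB keypad d x y = true)
    (hmin : ∀ j < d, pvReachInB keypad j x y = false)
    (hd1 : 1 ≤ d) (hdle : d ≤ keypad.length) :
    pvLoopA keypad y (4 ^ (keypad.length + 2)) [(x.1, x.2, ([] : List Char))] none [] =
      pvE keypad y x d := by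
  have hGH : pvH keypad y x (d - 1) = pvE keypad y x d := by
    have h := pv_G keypad y (d - 1) x (fun j hj => hmin j (by omega))
    rw [h, show d - 1 + 1 = d by omega]
  have hsum := pv_sumW_le keypad y x (d - 1) 0
  have hc1 := pv_W_card keypad y x (d - 1)
  have hc2 := pv_W_card keypad y x d
  have hpow1 : (4 : Nat) ^ (0 + (d - 1)) ≤ 4 ^ keypad.length :=
    Nat.pow_le_pow_right (by omega) (by omega)
  have hpow2 : (4 : Nat) ^ d ≤ 4 ^ keypad.length := Nat.pow_le_pow_right (by omega) hdle
  have hpowL : (4 : Nat) ^ (keypad.length + 2) = 4 ^ keypad.length * 16 := by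
    rw [pow_add]; norm_num
  have hc1' : (pvW keypad y x (d - 1)).length ≤ 4 ^ keypad.length := by
    have : (4 : Nat) ^ (d - 1) ≤ 4 ^ keypad.length := Nat.pow_le_pow_right (by omega) (by omega)
    omega
  have h40 : (4 : Nat) ^ 0 = 1 := by norm_num
  obtain ⟨f, hf⟩ : ∃ f, 4 ^ (keypad.length + 2) =
      pvSumW keypad y x 0 (d - 1) +
        ((pvW keypad y x (d - 1)).length + ((pvW keypad y x d).length + f)) := by
    refine ⟨4 ^ (keypad.length + 2) -
      (pvSumW keypad y x 0 (d - 1) +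
        ((pvW keypad y x (d - 1)).length + ((pvW keypad y x d).length + 0))), by omega⟩
  rw [hf, show [(x.1, x.2, ([] : List Char))] = (pvW keypad y x 0).map pvToE from rfl]
  rw [pv_chainLow keypad y x d hmin (d - 1) 0 _ (by omega), show 0 + (d - 1) = d - 1 by omega]
  have hHne : (pvW keypad y x (d - 1)).flatMap (pvHit keypad y) ≠ [] := by
    show pvH keypad y x (d - 1) ≠ []
    rw [hGH]
    exact pv_E_ne keypad y d x hspec
  have hWd : (pvW keypad y x (d - 1)).flatMap (pvChil keypad y none) = pvW keypad y x d := by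
    have hc : ∀ e ∈ pvW keypad y x (d - 1), pvChil keypad y none e = pvExpand keypad y e :=
      fun e _ => by rw [pvChil, if_pos (show pvLtO (e.2.length + 1) none = true from rfl)]
    rw [pv_flatMap_congr hc]
    rw [show d = d - 1 + 1 by omega]
    rfl
  have hlv1 := pv_levelA keypad y (d - 1) (pvW keypad y x (d - 1)) [] none []
    ((pvW keypad y x d).length + f) (pv_W_len keypad y x (d - 1))
  rw [List.append_nil, hWd, if_neg hHne, List.nil_append, List.nil_append] at hlv1
  rw [hlv1]
  have hnohitd : (pvW keypad y x d).flatMap (pvHit keypad y) = [] := by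
    rw [List.flatMap_eq_nil_iff]
    intro e he
    by_contra hne
    have h1 := pv_hit_ne keypad y e hne
    have h2 := pv_W_reach keypad y x d e he
    have h3 : pvReachInB keypad (d + 1) x y = true :=
      pv_reach_succ keypad y d x e.1 h2 h1.1 h1.2
    obtain ⟨t1, ht1⟩ := pv_reach_parity keypad y d x hspec
    obtain ⟨t2, ht2⟩ := pv_reach_parity keypad y (d + 1) x h3
    push_cast at ht1 ht2
    omega
  have hchild : (pvW keypad y x d).flatMap (pvChil keypad y (pvMinO none (d - 1 + 2))) = [] := by
    rw [List.flatMap_eq_nil_iff]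
    intro e he
    rw [pvChil, if_neg]
    rw [pv_W_len keypad y x d e he]
    show ¬ (pvLtO (d + 1) (pvMinO none (d - 1 + 2)) = true)
    simp only [pvLtO, pvMinO, decide_eq_true_eq]
    omega
  have hlv2 := pv_levelA keypad y d (pvW keypad y x d) [] (pvMinO none (d - 1 + 2))
    ((pvW keypad y x (d - 1)).flatMap (pvHit keypad y)) f (pv_W_len keypad y x d)
  rw [hchild, hnohitd, if_pos rfl] at hlv2
  simp only [List.append_nil, List.map_nil] at hlv2
  rw [hlv2, pv_loopA_nil]
  exact hGH

theorem pv_isolatedA (keypad : List (Int × Int)) (y x : Int × Int)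
    (hiso : ∀ v ∈ pvNbrsPos x, v ∉ keypad) :
    pvLoopA keypad y (4 ^ (keypad.length + 2)) [(x.1, x.2, ([] : List Char))] none [] = [] := by
  obtain ⟨m, hm⟩ : ∃ m, 4 ^ (keypad.length + 2) = m + 1 := by
    have : 0 < 4 ^ (keypad.length + 2) := Nat.pow_pos (by norm_num)
    exact ⟨4 ^ (keypad.length + 2) - 1, by omega⟩
  rw [hm]
  conv_lhs => rw [pvLoopA]
  simp only [pv_innerA]
  have hq : (pvNbrs x.1 x.2).filterMap (pvFq keypad y [] none) = [] := by
    rw [List.filterMap_eq_nil_iff]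
    intro vm hvm
    have hpos : vm.1 ∈ pvNbrsPos x := by
      rw [← pv_nbrs_fst]; exact List.mem_map_of_mem hvm
    rw [pvFq, if_neg]
    rintro ⟨hk, -, -⟩
    exact hiso vm.1 hpos hk
  have hh : (pvNbrs x.1 x.2).filterMap (pvFh keypad y []) = [] := by
    rw [List.filterMap_eq_nil_iff]
    intro vm hvm
    have hpos : vm.1 ∈ pvNbrsPos x := by
      rw [← pv_nbrs_fst]; exact List.mem_map_of_mem hvm
    rw [pvFh, if_neg]
    rintro ⟨hk, -⟩
    exact hiso vm.1 hpos hk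
  rw [hq, hh]
  simp only [List.append_nil]
  split
  · exact pv_loopA_nil keypad y m _ _
  · exact pv_loopA_nil keypad y m _ _

theorem pv_invB (keypad : List (Int × Int)) (y : Int × Int) :
    pvInv keypad y (keypad.length + 2) (pvBfsRun keypad y) := by
  have h := pv_inv_range keypad y (keypad.length + 2) 0 _ (pv_inv_zero keypad y)
  rw [show ((0 : Nat) : Int) + 1 + ((keypad.length + 2 : Nat) : Int) = (keypad.length : Int) + 3 by
        push_cast; ring,
      show ((0 : Nat) : Int) + 1 = 1 by norm_num,
      show 0 + (keypad.length + 2) = keypad.length + 2 by omega] at h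
  exact h

-- ===== VERDICT (by name: the statement is the Claim_ definition above) =====
theorem find_best_x_to_y_spec : Claim_equal_find_best_x_to_y := by
  intro keypad x y _ hpre
  unfold Spec_find_best_x_to_y
  by_cases hxy : x = y
  · subst hxy
    rw [find_best_x_to_y, find_best_x_to_y_alt, if_pos rfl, if_pos rfl]
  · obtain ⟨hD, hF⟩ := pv_invB keypad y
    rw [find_best_x_to_y, find_best_x_to_y_alt, if_neg hxy, if_neg hxy]
    rcases hpre with h | h | h
    · exact absurd h hxy
    · rw [List.any_eq_true] at h
      obtain ⟨k0, hk0mem, hk0⟩ := h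
      rw [List.mem_range] at hk0mem
      have hex : ∃ k, pvReachInB keypad k x y = true := ⟨k0, hk0⟩
      set d := Nat.find hex with hd
      have hspec : pvReachInB keypad d x y = true := Nat.find_spec hex
      have hmin : ∀ j < d, pvReachInB keypad j x y = false := by
        intro j hj
        have hm := Nat.find_min hex hj
        cases hb : pvReachInB keypad j x y
        · rfl
        · exact absurd hb hm
      have hd1 : 1 ≤ d := by
        rcases Nat.eq_zero_or_pos d with h0 | h1
        · exfalso
          rw [h0] at hspec
          exact hxy (by simpa [pvReachInB] using hspec)
        · exact h1
      have hdle : d ≤ keypad.length := le_trans (Nat.find_min' hex hk0) (by omega)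
      have hminR : pvMinR keypad y x d := ⟨hspec, hmin⟩
      have hget : (pvBfsRun keypad y).1.get? x = some d := (hD x d).mpr ⟨hminR, by omega⟩
      rw [pv_runA keypad y x d hspec hmin hd1 hdle, hget]
      show List.map String.mk (pvE keypad y x d) =
        List.map String.mk (pvEnumB (PySem.Set.ofList keypad) (pvBfsRun keypad y).1 x d)
      rw [pv_enumB_eq keypad y (keypad.length + 2) (pvBfsRun keypad y).1 hD d x (by omega) hminR]
    · have hget : (pvBfsRun keypad y).1.get? x = none := by
        cases hg : (pvBfsRun keypad y).1.get? x with
        | none => rfl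
        | some j =>
          obtain ⟨⟨hr, _⟩, _⟩ := (hD x j).mp hg
          rcases Nat.eq_zero_or_pos j with h0 | h1
          · rw [h0] at hr
            exact absurd (by simpa [pvReachInB] using hr) hxy
          · obtain ⟨v, hv, hkp, _⟩ := pv_reach_destruct keypad x y (j - 1)
              (by rw [show j - 1 + 1 = j by omega]; exact hr)
            exact absurd hkp (h v hv)
      rw [pv_isolatedA keypad y x h, hget]
      rfl
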